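-- pv_equiv track=rewrite | github.com/seamuss1/Thorium_Molten_Salt_Reactor | src/thorium_reactor/flow/primary_system.py | _partition_thermal_legs
-- ===== SOURCE A (Python) =====
-- from typing import Any
--
-- def _partition_thermal_legs(
--     cycle_edges: list[dict[str, Any]],
--     components: dict[str, dict[str, Any]],
-- ) -> tuple[list[str], list[str]]:
--     if not cycle_edges:
--         return [], []
--
--     source_component_id = next(
--         (component_id for component_id, component in components.items() if component.get("kind") == "heat_source"),
--         "",
--     )
--     sink_component_id = next(
--         (component_id for component_id, component in components.items() if component.get("kind") == "heat_sink"),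
--         "",
--     )
--     if not source_component_id or not sink_component_id:
--         return [], []
--
--     cold_leg_edge_ids: list[str] = []
--     hot_leg_edge_ids: list[str] = []
--     encountered_source = False
--     for edge in cycle_edges:
--         edge_id = str(edge["id"])
--         if str(edge.get("from") or "") == source_component_id:
--             encountered_source = True
--         if encountered_source:
--             hot_leg_edge_ids.append(edge_id)
--         else:
--             cold_leg_edge_ids.append(edge_id)
--         if str(edge.get("to") or "") == sink_component_id and encountered_source:
--             break
--     if not hot_leg_edge_ids or not cold_leg_edge_ids:
--         return (
--             [str(edge["id"]) for edge in cycle_edges if str(edge.get("leg", "")) == "hot_leg"],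
--             [str(edge["id"]) for edge in cycle_edges if str(edge.get("leg", "")) == "cold_leg"],
--         )
--     return hot_leg_edge_ids, cold_leg_edge_ids
-- ===== SOURCE B (Python) =====
-- from typing import Any
--
--
-- def _partition_thermal_legs(
--     cycle_edges: list[dict[str, Any]],
--     components: dict[str, dict[str, Any]],
-- ) -> tuple[list[str], list[str]]:
--     if not cycle_edges:
--         return [], []
--
--     source_component_id = next(
--         (cid for cid, c in components.items() if c.get("kind") == "heat_source"), ""
--     )
--     sink_component_id = next(
--         (cid for cid, c in components.items() if c.get("kind") == "heat_sink"), ""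
--     )
--     if not source_component_id or not sink_component_id:
--         return [], []
--
--     # Split indices computed up front: i = first edge leaving the heat source,
--     # j = first edge at or after i that reaches the heat sink (else last edge).
--     i = next(
--         (k for k, e in enumerate(cycle_edges) if str(e.get("from") or "") == source_component_id),
--         None,
--     )
--     if i is not None and i > 0:
--         j = next(
--             (k for k in range(i, len(cycle_edges)) if str(cycle_edges[k].get("to") or "") == sink_component_id),
--             len(cycle_edges) - 1,
--         )
--         return (
--             [str(e["id"]) for e in cycle_edges[i:j + 1]],
--             [str(e["id"]) for e in cycle_edges[:i]],
--         )
--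
--     # One leg would be empty: fall back to the explicit 'leg' labels.
--     return (
--         [str(e["id"]) for e in cycle_edges if str(e.get("leg", "")) == "hot_leg"],
--         [str(e["id"]) for e in cycle_edges if str(e.get("leg", "")) == "cold_leg"],
--     )
-- ===== Notes on version B (the rewrite author's own statement) =====
-- stated objective: alternative
-- what changed: B computes the two split indices up front (first edge leaving the heat source, first edge at or after it reaching the heat sink) and builds the legs with list slices, instead of A's single pass that carries an encountered_source flag and appends edge by edge with an in-loop break.
import Mathlib
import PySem

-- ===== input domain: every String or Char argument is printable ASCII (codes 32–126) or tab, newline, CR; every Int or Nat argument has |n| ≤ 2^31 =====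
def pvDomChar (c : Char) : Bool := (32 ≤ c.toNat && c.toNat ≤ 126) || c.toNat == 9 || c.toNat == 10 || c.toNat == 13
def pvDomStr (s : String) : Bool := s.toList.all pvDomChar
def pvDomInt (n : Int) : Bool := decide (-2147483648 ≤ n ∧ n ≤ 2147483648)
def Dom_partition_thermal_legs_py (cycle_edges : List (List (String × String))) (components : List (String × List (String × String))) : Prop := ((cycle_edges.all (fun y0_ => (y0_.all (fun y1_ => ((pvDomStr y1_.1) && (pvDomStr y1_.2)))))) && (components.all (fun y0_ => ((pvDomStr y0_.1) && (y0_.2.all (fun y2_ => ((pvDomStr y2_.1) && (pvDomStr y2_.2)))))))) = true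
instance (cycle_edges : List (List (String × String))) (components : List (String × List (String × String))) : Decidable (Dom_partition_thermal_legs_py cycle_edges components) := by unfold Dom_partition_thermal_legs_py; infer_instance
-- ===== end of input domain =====

-- B computes the hot/cold split indices up front (first source edge, first sink edge after it)
-- and slices the edge list, instead of A's single pass carrying an encountered-source flag (objective: alternative).


-- ===== PORT A =====
-- str(edge.get(k) or "") / str(edge.get(k, "")): values are strings here, so both are the lookup with default ""
def pvGetD (e : List (String × String)) (k : String) : String := (PySem.Dict.mk e).getD k ""

-- next((cid for cid, c in components.items() if c.get("kind") == <kind>), "")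
def pvFirstKind (components : List (String × List (String × String))) (kind : String) : String :=
  match components.find? (fun c => pvGetD c.2 "kind" == kind) with
  | some c => c.1
  | none => ""

-- the fallback list comprehensions filtering on the 'leg' field (identical code in A and B)
def pvFallback (cycle_edges : List (List (String × String))) : List String × List String :=
  ( (cycle_edges.filter (fun e => pvGetD e "leg" == "hot_leg")).map (fun e => pvGetD e "id"),
    (cycle_edges.filter (fun e => pvGetD e "leg" == "cold_leg")).map (fun e => pvGetD e "id") )

-- A's for-loop with the encountered_source flag; edge["id"] is pvGetD e "id", exact when "id" is a key (Pre_)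
def pvLoopA (src snk : String) : List (List (String × String)) → List String → List String → Bool → List String × List String
  | [], cold, hot, _ => (cold, hot)
  | e :: rest, cold, hot, enc =>
    let eid := pvGetD e "id"
    let enc' := enc || (pvGetD e "from" == src)
    let cold' := if enc' then cold else cold ++ [eid]
    let hot' := if enc' then hot ++ [eid] else hot
    if pvGetD e "to" == snk && enc' then (cold', hot')
    else pvLoopA src snk rest cold' hot' enc'

def partition_thermal_legs_py (cycle_edges : List (List (String × String))) (components : List (String × List (String × String))) : List String × List String :=
  if cycle_edges.isEmpty then ([], [])
  else
    let src := pvFirstKind components "heat_source"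
    let snk := pvFirstKind components "heat_sink"
    if src == "" || snk == "" then ([], [])
    else
      let ch := pvLoopA src snk cycle_edges [] [] false
      if ch.2.isEmpty || ch.1.isEmpty then pvFallback cycle_edges
      else (ch.2, ch.1)

-- ===== PORT B =====
-- slices cycle_edges[:i] / cycle_edges[i:j+1] with 0 ≤ i ≤ j < len ported as take/drop (exact for these bounds)
def partition_thermal_legs_py_alt (cycle_edges : List (List (String × String))) (components : List (String × List (String × String))) : List String × List String :=
  if cycle_edges.isEmpty then ([], [])
  else
    let src := pvFirstKind components "heat_source"
    let snk := pvFirstKind components "heat_sink"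
    if src == "" || snk == "" then ([], [])
    else
      match cycle_edges.findIdx? (fun e => pvGetD e "from" == src) with
      | some i =>
        if 0 < i then
          let j := match (cycle_edges.drop i).findIdx? (fun e => pvGetD e "to" == snk) with
                   | some k => i + k
                   | none => cycle_edges.length - 1
          ( ((cycle_edges.drop i).take (j + 1 - i)).map (fun e => pvGetD e "id"),
            (cycle_edges.take i).map (fun e => pvGetD e "id") )
        else pvFallback cycle_edges
      | none => pvFallback cycle_edges

-- ===== PRECONDITION & SPEC =====
-- Pre_ excludes edge lists in which some edge lacks an "id" key while a heat source and sink exist: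
-- there edge["id"] can raise KeyError (whether it does depends on where A's scan stops).
def Pre_partition_thermal_legs_py (cycle_edges : List (List (String × String))) (components : List (String × List (String × String))) : Prop :=
  cycle_edges = [] ∨ pvFirstKind components "heat_source" = "" ∨ pvFirstKind components "heat_sink" = ""
  ∨ ∀ e ∈ cycle_edges, (PySem.Dict.mk e).contains "id" = true
instance (cycle_edges : List (List (String × String))) (components : List (String × List (String × String))) : Decidable (Pre_partition_thermal_legs_py cycle_edges components) := by unfold Pre_partition_thermal_legs_py; infer_instance

def pvWitness_partition_thermal_legs_py : (List (List (String × String))) × (List (String × List (String × String))) :=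
  ([[("id", "e0")], [("id", "e1"), ("from", "S"), ("to", "K")]],
   [("S", [("kind", "heat_source")]), ("K", [("kind", "heat_sink")])])

def Spec_partition_thermal_legs_py (cycle_edges : List (List (String × String))) (components : List (String × List (String × String))) (out : List String × List String) : Prop := out = partition_thermal_legs_py_alt cycle_edges components
instance (cycle_edges : List (List (String × String))) (components : List (String × List (String × String))) (out : List String × List String) : Decidable (Spec_partition_thermal_legs_py cycle_edges components out) := by unfold Spec_partition_thermal_legs_py; infer_instance

-- ===== CLAIM (what is proved, stated in full; the proofs are below) =====
def Claim_equal_partition_thermal_legs_py : Prop := ∀ (cycle_edges : List (List (String × String))) (components : List (String × List (String × String))), Dom_partition_thermal_legs_py cycle_edges components → Pre_partition_thermal_legs_py cycle_edges components → Spec_partition_thermal_legs_py cycle_edges components (partition_thermal_legs_py cycle_edges components)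

-- ===== LEMMAS AND PROOFS =====

-- the hot-leg segment: edges up to and including the first one reaching the sink
def pvTakeThrough (snk : String) : List (List (String × String)) → List (List (String × String))
  | [] => []
  | e :: r => if pvGetD e "to" == snk then [e] else e :: pvTakeThrough snk r

theorem pvLoopA_true (src snk : String) (l : List (List (String × String))) :
    ∀ cold hot, pvLoopA src snk l cold hot true =
      (cold, hot ++ (pvTakeThrough snk l).map (fun e => pvGetD e "id")) := by
  induction l with
  | nil => intro cold hot; simp [pvLoopA, pvTakeThrough]
  | cons e r ih =>
    intro cold hot
    by_cases h : (pvGetD e "to" == snk) = true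
    · simp [pvLoopA, pvTakeThrough, h]
    · simp only [Bool.not_eq_true] at h
      simp [pvLoopA, pvTakeThrough, h, ih]

theorem pvLoopA_main (src snk : String) (l : List (List (String × String))) :
    ∀ cold,
      (match l.findIdx? (fun e => pvGetD e "from" == src) with
       | none => pvLoopA src snk l cold [] false = (cold ++ l.map (fun e => pvGetD e "id"), [])
       | some i => i < l.length ∧ pvLoopA src snk l cold [] false =
           (cold ++ (l.take i).map (fun e => pvGetD e "id"),
            (pvTakeThrough snk (l.drop i)).map (fun e => pvGetD e "id"))) := by
  induction l with
  | nil => intro cold; simp [pvLoopA]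
  | cons e r ih =>
    intro cold
    by_cases hp : (pvGetD e "from" == src) = true
    · simp only [List.findIdx?_cons, hp, if_pos]
      refine ⟨Nat.succ_pos _, ?_⟩
      by_cases hq : (pvGetD e "to" == snk) = true
      · simp [pvLoopA, pvTakeThrough, hp, hq]
      · simp only [Bool.not_eq_true] at hq
        simp [pvLoopA, pvTakeThrough, hp, hq, pvLoopA_true]
    · simp only [Bool.not_eq_true] at hp
      have step : pvLoopA src snk (e :: r) cold [] false =
          pvLoopA src snk r (cold ++ [pvGetD e "id"]) [] false := by
        simp [pvLoopA, hp]
      have := ih (cold ++ [pvGetD e "id"])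
      simp only [List.findIdx?_cons, hp, if_neg, Bool.false_eq_true, not_false_iff]
      cases hfi : r.findIdx? (fun e => pvGetD e "from" == src) with
      | none =>
        rw [hfi] at this
        simp [step, this]
      | some i =>
        rw [hfi] at this
        refine ⟨by simpa using Nat.succ_lt_succ this.1, ?_⟩
        simp [step, this.2]

theorem takeThrough_of_findIdx?_some (snk : String) (l : List (List (String × String))) (k : Nat)
    (h : l.findIdx? (fun e => pvGetD e "to" == snk) = some k) :
    l.take (k + 1) = pvTakeThrough snk l := by
  induction l generalizing k with
  | nil => simp at h
  | cons e r ih =>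
    by_cases hq : (pvGetD e "to" == snk) = true
    · simp only [List.findIdx?_cons, hq, if_pos] at h
      cases h
      simp [pvTakeThrough, hq]
    · simp only [Bool.not_eq_true] at hq
      simp only [List.findIdx?_cons, hq, Bool.false_eq_true, if_neg, not_false_iff, Option.map_eq_some_iff] at h
      obtain ⟨k', hk', rfl⟩ := h
      simp [pvTakeThrough, hq, List.take_succ_cons, ih k' hk']

theorem takeThrough_of_findIdx?_none (snk : String) (l : List (List (String × String)))
    (h : l.findIdx? (fun e => pvGetD e "to" == snk) = none) :
    pvTakeThrough snk l = l := by
  induction l with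
  | nil => simp [pvTakeThrough]
  | cons e r ih =>
    by_cases hq : (pvGetD e "to" == snk) = true
    · simp [List.findIdx?_cons, hq] at h
    · simp only [Bool.not_eq_true] at hq
      simp only [List.findIdx?_cons, hq, Bool.false_eq_true, if_neg, not_false_iff, Option.map_eq_none_iff] at h
      simp [pvTakeThrough, hq, ih h]

theorem takeThrough_ne_nil (snk : String) (e : List (String × String)) (r : List (List (String × String))) :
    pvTakeThrough snk (e :: r) ≠ [] := by
  by_cases hq : (pvGetD e "to" == snk) = true <;> simp [pvTakeThrough, hq]

-- ===== VERDICT (by name: the statement is the Claim_ definition above) =====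
theorem partition_thermal_legs_py_spec : Claim_equal_partition_thermal_legs_py := by
  intro ce comps _ _
  unfold Spec_partition_thermal_legs_py partition_thermal_legs_py partition_thermal_legs_py_alt
  by_cases hce : ce.isEmpty
  · simp [hce]
  · simp only [hce, if_neg, Bool.false_eq_true, not_false_iff]
    by_cases hsrc : (pvFirstKind comps "heat_source" == "" || pvFirstKind comps "heat_sink" == "") = true
    · simp [hsrc]
    · simp only [hsrc, Bool.false_eq_true, if_neg, not_false_iff]
      have main := pvLoopA_main (pvFirstKind comps "heat_source") (pvFirstKind comps "heat_sink") ce []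
      cases hfi : ce.findIdx? (fun e => pvGetD e "from" == pvFirstKind comps "heat_source") with
      | none =>
        rw [hfi] at main
        simp [main]
      | some i =>
        rw [hfi] at main
        obtain ⟨hilen, hloop⟩ := main
        simp only [hloop, List.nil_append]
        by_cases hi : 0 < i
        · -- no fallback on either side
          have hdrop : ∃ e r, ce.drop i = e :: r := by
            cases hd : ce.drop i with
            | nil => exfalso; have := List.drop_eq_nil_iff.mp hd; omega
            | cons e r => exact ⟨e, r, rfl⟩
          obtain ⟨e, r, hd⟩ := hdrop
          have hne : ce ≠ [] := by simpa [List.isEmpty_iff] using hce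
          have h3 : pvTakeThrough (pvFirstKind comps "heat_sink") (ce.drop i) ≠ [] := by
            rw [hd]; exact takeThrough_ne_nil _ _ _
          cases hfj : (ce.drop i).findIdx? (fun e => pvGetD e "to" == pvFirstKind comps "heat_sink") with
          | some k =>
            rw [if_neg (by simp [List.isEmpty_iff, h3, hne, Nat.pos_iff_ne_zero.mp hi])]
            have h2 : i + k + 1 - i = k + 1 := by omega
            simp [h2, hi, takeThrough_of_findIdx?_some _ _ _ hfj]
          | none =>
            rw [if_neg (by simp [List.isEmpty_iff, h3, hne, Nat.pos_iff_ne_zero.mp hi])]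
            have h1 : ce.length - 1 + 1 - i = (ce.drop i).length := by
              rw [List.length_drop]; omega
            simp [h1, hi, takeThrough_of_findIdx?_none _ _ hfj]
        · -- i = 0: A's cold leg is empty, B falls back too
          have hi0 : i = 0 := by omega
          subst hi0
          simp
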